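-- pv_equiv track=rewrite | github.com/epsilon-star/storagemgr | manager.py | formatVolume
-- ===== SOURCE A (Python) =====
-- vol_table = [
--     "",
--     "K",
--     "M",
--     "G",
--     "T",
-- ]
--
-- def formatVolume(inputs,cot_format = 0):
--     inputs = str(inputs)
--     buff1 = inputs[::-1]
--     output = ""
--     if cot_format:
--         # output = ','.join([inputs[x:x+3] for x in range(0,len(inputs),3)][y][::-1] for y in range())
--         output = inputs + 'b'
--     else:
--         buff = [buff1[x:x+3] for x in range(0,len(buff1),3)]
--         output = buff[-1][::-1] + "" + (vol_table[len(buff)-1] if len(buff)-1 < len(vol_table) else f'e^{len(buff1)-1}') + "b"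
--     return output
-- ===== SOURCE B (Python) =====
-- vol_table = [
--     "",
--     "K",
--     "M",
--     "G",
--     "T",
-- ]
--
-- def formatVolume(inputs, cot_format=0):
--     s = str(inputs)
--     if cot_format:
--         return s + 'b'
--     n = len(s)
--     off = n % 3 or 3                 # length of the leading digit group
--     groups = 1 + (n - off) // 3      # number of 3-digit groups
--     if groups - 1 < len(vol_table):
--         suffix = vol_table[groups - 1]
--     else:
--         suffix = 'e^%d' % (n - 1)
--     return s[:off] + suffix + 'b'
-- ===== Notes on version B (the rewrite author's own statement) =====
-- stated objective: idiomatic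
-- what changed: B drops A's string reversal and chunk-list construction entirely: it computes the leading group directly as a forward prefix s[:off] with off = len%3 or 3 and the unit index arithmetically as 1+(n-off)//3, instead of reversing the string, slicing it into 3-char chunks, and un-reversing the last chunk.
import Mathlib
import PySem

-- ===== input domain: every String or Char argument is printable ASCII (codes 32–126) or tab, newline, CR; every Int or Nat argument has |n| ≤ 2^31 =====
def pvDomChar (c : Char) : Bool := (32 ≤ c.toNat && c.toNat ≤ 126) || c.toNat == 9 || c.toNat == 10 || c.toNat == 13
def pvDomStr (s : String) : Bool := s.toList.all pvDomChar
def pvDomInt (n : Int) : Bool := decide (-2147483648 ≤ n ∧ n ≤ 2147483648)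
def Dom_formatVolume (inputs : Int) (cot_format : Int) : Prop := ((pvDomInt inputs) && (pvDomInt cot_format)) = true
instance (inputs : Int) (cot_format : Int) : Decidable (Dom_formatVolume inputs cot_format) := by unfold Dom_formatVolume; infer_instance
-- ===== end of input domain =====

-- B drops A's reverse/chunk/un-reverse pipeline: it takes the leading digit group as a
-- forward prefix and picks the unit suffix by arithmetic on the length (same cost, plainer).

-- ===== PORT A =====
def volTable : List String := ["", "K", "M", "G", "T"]

def formatVolume (inputs : Int) (cot_format : Int) : String :=
  let s := PySem.Int.toStr inputs                 -- inputs = str(inputs)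
  let buff1 := s.toList.reverse                   -- buff1 = inputs[::-1]
  if cot_format ≠ 0 then                          -- if cot_format:
    s ++ "b"
  else
    -- buff = [buff1[x:x+3] for x in range(0,len(buff1),3)]
    let buff := (PySem.List.pyRange 0 (buff1.length : Int) 3).map
        (fun x => PySem.List.slice buff1 (some x) (some (x + 3)))
    -- buff[-1]: always in range, since str(inputs) is never empty, so buff ≠ []
    let last := PySem.List.pyGetD buff (-1) []
    -- vol_table[len(buff)-1]: in range under the guard of the if
    String.mk last.reverse ++ "" ++
      (if (buff.length : Int) - 1 < (volTable.length : Int)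
        then PySem.List.pyGetD volTable ((buff.length : Int) - 1) ""
        else "e^" ++ PySem.Int.toStr ((buff1.length : Int) - 1)) ++ "b"

-- ===== PORT B =====
def formatVolume_alt (inputs : Int) (cot_format : Int) : String :=
  let s := PySem.Int.toStr inputs                 -- s = str(inputs)
  if cot_format ≠ 0 then
    s ++ "b"
  else
    let n := s.toList.length                      -- n = len(s)
    let off := if n % 3 = 0 then 3 else n % 3     -- off = n % 3 or 3
    let groups := 1 + (n - off) / 3               -- groups = 1 + (n - off) // 3
    -- vol_table[groups-1]: in range under the guard of the if
    let suffix := if (groups : Int) - 1 < (volTable.length : Int)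
        then PySem.List.pyGetD volTable ((groups : Int) - 1) ""
        else "e^" ++ PySem.Int.toStr ((n : Int) - 1)
    String.mk (s.toList.take off) ++ suffix ++ "b"   -- s[:off] + suffix + 'b'

-- ===== PRECONDITION & SPEC =====
def Spec_formatVolume (inputs : Int) (cot_format : Int) (out : String) : Prop := out = formatVolume_alt inputs cot_format
instance (inputs : Int) (cot_format : Int) (out : String) : Decidable (Spec_formatVolume inputs cot_format out) := by unfold Spec_formatVolume; infer_instance

-- ===== CLAIM (what is proved, stated in full; the proofs are below) =====
def Claim_equal_formatVolume : Prop := ∀ (inputs : Int) (cot_format : Int), Dom_formatVolume inputs cot_format → Spec_formatVolume inputs cot_format (formatVolume inputs cot_format)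

-- ===== LEMMAS AND PROOFS =====

-- str(n) (Nat.toDigits under PySem.Int.toStr) is never the empty string.
theorem toDigits_ne_nil (b m : Nat) : Nat.toDigits b m ≠ [] := by
  unfold Nat.toDigits
  intro h
  have h' := congrArg List.length h
  revert h'
  show (Nat.toDigitsCore b (m+1) m []).length = ([] : List Char).length → False
  rw [show (m+1) = Nat.succ m from rfl]
  simp only [Nat.toDigitsCore]
  split
  · simp
  · rw [Nat.toDigitsCore_lens_eq]; simp

theorem toChars_ne_nil (n : Int) : PySem.Int.toChars n ≠ [] := by
  unfold PySem.Int.toChars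
  split
  · simp
  · exact toDigits_ne_nil 10 _

-- A's chunk list over the reversed string is the 3-char groups followed, as its last
-- element, by the reverse of the forward prefix of length off = len % 3 or 3.
theorem buff_split (cs : List Char) (h : cs ≠ []) :
    (PySem.List.pyRange 0 ((cs.reverse).length : Int) 3).map
        (fun x => PySem.List.slice cs.reverse (some x) (some (x + 3)))
      = ((List.range ((1 + (cs.length - (if cs.length % 3 = 0 then 3 else cs.length % 3)) / 3) - 1)).map
            (fun (k : Nat) => PySem.List.slice cs.reverse (some (3*(k:Int))) (some (3*(k:Int)+3))))
          ++ [(cs.take (if cs.length % 3 = 0 then 3 else cs.length % 3)).reverse] := by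
  set n := cs.length with hn
  have hn1 : 1 ≤ n := by
    have := List.length_pos_iff.mpr h
    omega
  set off := if n % 3 = 0 then 3 else n % 3 with hoffdef
  have hoff3 : off ≤ 3 := by rw [hoffdef]; split <;> omega
  have hoffn : off ≤ n := by rw [hoffdef]; split <;> omega
  set q := 1 + (n - off) / 3 with hq
  have h3q : 3 * (q - 1) = n - off := by
    rw [hq, hoffdef]; split <;> omega
  rw [PySem.List.pyRange_of_pos 0 ((cs.reverse).length : Int) (by norm_num)]
  rw [List.map_map]
  have hlen : (cs.reverse).length = n := by simp [hn]
  rw [hlen]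
  have hif : (0 : Int) < (n : Int) := by exact_mod_cast hn1
  rw [if_pos hif]
  have hN : (((n:Int) - 0 + 3 - 1)/3).toNat = q := by rw [hq, hoffdef]; split <;> omega
  rw [hN]
  have hr : List.range q = List.range (q-1) ++ [q-1] := by
    conv_lhs => rw [show q = (q-1)+1 from by omega]
    rw [List.range_succ]
  rw [hr, List.map_append]
  congr 1
  · apply List.map_congr_left
    intro k hk
    simp [Function.comp]
  · simp only [List.map_cons, List.map_nil, Function.comp]
    congr 1
    have ha : (0 : Int) + 3 * ((q-1 : Nat) : Int) = ((3*(q-1) : Nat) : Int) := by push_cast; ring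
    rw [ha]
    have hb : ((3*(q-1) : Nat) : Int) + 3 = ((3*(q-1)+3 : Nat) : Int) := by push_cast; ring
    rw [hb]
    rw [PySem.List.slice_toNat _ (by positivity) (by positivity)]
    simp only [Int.toNat_natCast]
    have hdl : (cs.reverse.drop (3*(q-1))).length ≤ 3 := by
      simp only [List.length_drop, hlen]
      omega
    rw [show (3*(q-1)+3) - 3*(q-1) = 3 from by omega]
    rw [List.take_of_length_le hdl]
    rw [h3q]
    rw [← List.reverse_take]

-- ===== VERDICT (by name: the statement is the Claim_ definition above) =====
theorem formatVolume_spec : Claim_equal_formatVolume := by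
  intro inputs cot_format _
  unfold Spec_formatVolume formatVolume formatVolume_alt
  by_cases hc : cot_format ≠ 0
  · rw [if_pos hc, if_pos hc]
  · rw [if_neg hc, if_neg hc]
    have hne : (PySem.Int.toStr inputs).toList ≠ [] := by
      rw [PySem.Int.toList_toStr]; exact toChars_ne_nil inputs
    rw [buff_split _ hne]
    simp only [PySem.List.pyGetD_neg_one_append_singleton, List.length_append, List.length_map,
      List.length_range, List.length_cons, List.length_nil, List.length_reverse,
      List.reverse_reverse]
    rw [show (1 + ((PySem.Int.toStr inputs).toList.length -
        (if (PySem.Int.toStr inputs).toList.length % 3 = 0 then 3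
          else (PySem.Int.toStr inputs).toList.length % 3)) / 3) - 1 + 1
      = 1 + ((PySem.Int.toStr inputs).toList.length -
        (if (PySem.Int.toStr inputs).toList.length % 3 = 0 then 3
          else (PySem.Int.toStr inputs).toList.length % 3)) / 3 from by omega]
    simp [String.append_assoc]
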